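-- pv_equiv track=rewrite | github.com/elanbarenholtz/morphosyntax-experiment | word_aligned_metrics.py | map_tokens_to_words
-- ===== SOURCE A (Python) =====
-- from typing import List, Dict, Tuple
--
-- def map_tokens_to_words(text: str, token_offsets: List[Tuple[int, int]]) -> List[List[int]]:
--     """
--     Map token indices to word indices using character offsets.
--
--     Args:
--         text: The input text string
--         token_offsets: List of (start, end) character offsets for each token
--
--     Returns:
--         List of lists, where word_to_tokens[i] contains token indices for word i
--     """
--     # Find word boundaries (whitespace-delimited)
--     words = []
--     word_starts = []
--     word_ends = []
--
--     current_word_start = None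
--     for i, char in enumerate(text):
--         if char.isspace():
--             if current_word_start is not None:
--                 # End of word
--                 word_starts.append(current_word_start)
--                 word_ends.append(i)
--                 current_word_start = None
--         else:
--             if current_word_start is None:
--                 # Start of new word
--                 current_word_start = i
--
--     # Handle last word if text doesn't end with whitespace
--     if current_word_start is not None:
--         word_starts.append(current_word_start)
--         word_ends.append(len(text))
--
--     # Map tokens to words based on overlap
--     word_to_tokens = [[] for _ in range(len(word_starts))]
--
--     for token_idx, (tok_start, tok_end) in enumerate(token_offsets):
--         # Find which word(s) this token overlaps with
--         for word_idx in range(len(word_starts)):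
--             word_start = word_starts[word_idx]
--             word_end = word_ends[word_idx]
--
--             # Check for overlap
--             if tok_start < word_end and tok_end > word_start:
--                 word_to_tokens[word_idx].append(token_idx)
--                 break  # Assign to first matching word
--
--     return word_to_tokens
-- ===== SOURCE B (Python) =====
-- from typing import List, Tuple
--
-- def map_tokens_to_words(text: str, token_offsets: List[Tuple[int, int]]) -> List[List[int]]:
--     # One pass collecting word spans, then binary search per token instead of
--     # the inner linear scan over all words.
--     spans = []
--     cur = None
--     for i, ch in enumerate(text):
--         if ch.isspace():
--             if cur is not None:
--                 spans.append((cur, i))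
--                 cur = None
--         elif cur is None:
--             cur = i
--     if cur is not None:
--         spans.append((cur, len(text)))
--
--     buckets = [[] for _ in spans]
--     for tidx, (s, e) in enumerate(token_offsets):
--         # first span whose end is > s (spans sorted, non-overlapping)
--         lo, hi = 0, len(spans)
--         while lo < hi:
--             mid = (lo + hi) // 2
--             if s < spans[mid][1]:
--                 hi = mid
--             else:
--                 lo = mid + 1
--         if lo < len(spans) and e > spans[lo][0]:
--             buckets[lo].append(tidx)
--     return buckets
-- ===== Notes on version B (the rewrite author's own statement) =====
-- stated objective: alternative
-- what changed: B builds word spans as one list of (start,end) pairs and replaces A's inner linear scan over all words per token by a binary search on the sorted, non-overlapping span boundaries (O(log W) per token instead of O(W)).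
import Mathlib
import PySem

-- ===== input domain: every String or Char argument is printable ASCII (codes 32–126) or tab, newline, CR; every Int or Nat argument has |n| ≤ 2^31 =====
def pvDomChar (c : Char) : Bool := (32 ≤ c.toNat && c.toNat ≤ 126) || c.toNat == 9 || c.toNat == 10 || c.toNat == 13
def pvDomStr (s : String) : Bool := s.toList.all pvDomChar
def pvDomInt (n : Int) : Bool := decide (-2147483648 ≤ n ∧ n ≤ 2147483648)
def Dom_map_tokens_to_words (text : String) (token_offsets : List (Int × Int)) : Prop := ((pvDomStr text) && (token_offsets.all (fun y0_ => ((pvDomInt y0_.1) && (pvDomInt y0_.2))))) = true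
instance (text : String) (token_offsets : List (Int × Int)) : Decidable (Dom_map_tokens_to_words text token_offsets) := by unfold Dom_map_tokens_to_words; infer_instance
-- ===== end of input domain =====

-- B replaces A's inner linear scan over all words per token by a binary search
-- on the sorted word-span boundaries (objective: alternative algorithm, O(log W) per token).

-- ===== PORT A =====
-- the word-boundary loop of A: state (word_starts, word_ends, current_word_start), index i
def aSegGo : List Char → Nat → List Int × List Int × Option Int → List Int × List Int × Option Int
  | [], _, st => st
  | c :: cs, i, (ws, we, cur) =>
    if PySem.Chars.isspace c then
      match cur with
      | some c0 => aSegGo cs (i+1) (ws ++ [c0], we ++ [(i : Int)], none)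
      | none => aSegGo cs (i+1) (ws, we, none)
    else
      match cur with
      | none => aSegGo cs (i+1) (ws, we, some (i : Int))
      | some c0 => aSegGo cs (i+1) (ws, we, some c0)

-- the inner 'for word_idx in range(len(word_starts)) … break' of A
def aScan (s e : Int) : List Int → List Int → Nat → Option Nat
  | w0 :: ws, w1 :: we, i => if s < w1 ∧ e > w0 then some i else aScan s e ws we (i+1)
  | _, _, _ => none

def map_tokens_to_words (text : String) (token_offsets : List (Int × Int)) : List (List Int) :=
  let st := aSegGo text.toList 0 ([], [], none)
  let ws := match st.2.2 with | some c0 => st.1 ++ [c0] | none => st.1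
  let we := match st.2.2 with | some _ => st.2.1 ++ [(text.toList.length : Int)] | none => st.2.1
  let init := (List.range ws.length).map (fun _ => ([] : List Int))
  (PySem.List.enumerate token_offsets 0).foldl
    (fun buckets p =>
      match aScan p.2.1 p.2.2 ws we 0 with
      | some idx => buckets.set idx (buckets.getD idx [] ++ [p.1])
      | none => buckets) init

-- ===== PORT B =====
-- B's one-pass span collection: state (spans, cur), index i
def bSegGo : List Char → Nat → List (Int × Int) × Option Int → List (Int × Int) × Option Int
  | [], _, st => st
  | c :: cs, i, (spans, cur) =>
    if PySem.Chars.isspace c then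
      match cur with
      | some c0 => bSegGo cs (i+1) (spans ++ [(c0, (i : Int))], none)
      | none => bSegGo cs (i+1) (spans, none)
    else
      match cur with
      | none => bSegGo cs (i+1) (spans, some (i : Int))
      | some c0 => bSegGo cs (i+1) (spans, some c0)

-- B's while-loop binary search ((lo+hi)//2 on nonnegative ints is Nat division)
def bSearch (spans : List (Int × Int)) (s : Int) (lo hi : Nat) : Nat :=
  if lo < hi then
    if s < (spans.getD ((lo + hi) / 2) (0, 0)).2 then bSearch spans s lo ((lo + hi) / 2)
    else bSearch spans s ((lo + hi) / 2 + 1) hi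
  else lo
termination_by hi - lo
decreasing_by all_goals omega

def map_tokens_to_words_alt (text : String) (token_offsets : List (Int × Int)) : List (List Int) :=
  let st := bSegGo text.toList 0 ([], none)
  let spans := match st.2 with | some c0 => st.1 ++ [(c0, (text.toList.length : Int))] | none => st.1
  let init := (List.range spans.length).map (fun _ => ([] : List Int))
  (PySem.List.enumerate token_offsets 0).foldl
    (fun buckets p =>
      let lo := bSearch spans p.2.1 0 spans.length
      if lo < spans.length ∧ p.2.2 > (spans.getD lo (0, 0)).1 then
        buckets.set lo (buckets.getD lo [] ++ [p.1])
      else buckets) init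

-- ===== PRECONDITION & SPEC =====
def Spec_map_tokens_to_words (text : String) (token_offsets : List (Int × Int)) (out : List (List Int)) : Prop := out = map_tokens_to_words_alt text token_offsets
instance (text : String) (token_offsets : List (Int × Int)) (out : List (List Int)) : Decidable (Spec_map_tokens_to_words text token_offsets out) := by unfold Spec_map_tokens_to_words; infer_instance

-- ===== CLAIM (what is proved, stated in full; the proofs are below) =====
def Claim_equal_map_tokens_to_words : Prop := ∀ (text : String) (token_offsets : List (Int × Int)), Dom_map_tokens_to_words text token_offsets → Spec_map_tokens_to_words text token_offsets (map_tokens_to_words text token_offsets)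

-- ===== LEMMAS AND PROOFS =====

-- proof-only pair version of A's inner scan
def zScan (s e : Int) : List (Int × Int) → Nat → Option Nat
  | (w0, w1) :: rest, i => if s < w1 ∧ e > w0 then some i else zScan s e rest (i+1)
  | [], _ => none

lemma aScan_eq_zScan (s e : Int) : ∀ (ws we : List Int) (i : Nat), ws.length = we.length →
    aScan s e ws we i = zScan s e (ws.zip we) i := by
  intro ws
  induction ws with
  | nil => intro we i h; simp [aScan, zScan]
  | cons w0 ws ih =>
    intro we i h
    cases we with
    | nil => simp at h
    | cons w1 we =>
      simp only [List.zip_cons_cons, aScan, zScan]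
      split_ifs with hc
      · rfl
      · exact ih we (i+1) (by simpa using h)

-- B's seg loop tracks the zip of A's two lists
lemma bSegGo_eq_aSegGo : ∀ (cs : List Char) (i : Nat) (ws we : List Int) (cur : Option Int),
    ws.length = we.length →
    (aSegGo cs i (ws, we, cur)).1.length = (aSegGo cs i (ws, we, cur)).2.1.length ∧
    bSegGo cs i (ws.zip we, cur) =
      ((aSegGo cs i (ws, we, cur)).1.zip (aSegGo cs i (ws, we, cur)).2.1, (aSegGo cs i (ws, we, cur)).2.2) := by
  intro cs
  induction cs with
  | nil => intro i ws we cur h; exact ⟨h, rfl⟩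
  | cons c cs ih =>
    intro i ws we cur h
    by_cases hs : PySem.Chars.isspace c = true
    · cases cur with
      | none => simp only [aSegGo, bSegGo, hs, if_true]; exact ih (i+1) ws we none h
      | some c0 =>
        simp only [aSegGo, bSegGo, hs, if_true]
        have h2 := ih (i+1) (ws ++ [c0]) (we ++ [(i : Int)]) none (by simp [h])
        rwa [List.zip_append h] at h2
    · cases cur with
      | none =>
        simp only [aSegGo, bSegGo, hs, if_false, Bool.false_eq_true]
        exact ih (i+1) ws we _ h
      | some c0 =>
        simp only [aSegGo, bSegGo, hs, if_false, Bool.false_eq_true]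
        exact ih (i+1) ws we _ h

def SegInv (spans : List (Int × Int)) (cur : Option Int) (i : Nat) : Prop :=
  (∀ p ∈ spans, p.1 < p.2) ∧ spans.Pairwise (fun p q => p.2 ≤ q.1) ∧
  (∀ c0 ∈ cur, (∀ p ∈ spans, p.2 ≤ c0) ∧ c0 < (i : Int)) ∧
  (cur = none → ∀ p ∈ spans, p.2 ≤ (i : Int))

lemma bSegGo_inv : ∀ (cs : List Char) (i : Nat) (spans : List (Int × Int)) (cur : Option Int),
    SegInv spans cur i →
    SegInv (bSegGo cs i (spans, cur)).1 (bSegGo cs i (spans, cur)).2 (i + cs.length) := by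
  intro cs
  induction cs with
  | nil => intro i spans cur h; simpa [bSegGo] using h
  | cons c cs ih =>
    intro i spans cur h
    obtain ⟨h1, h2, h3, h4⟩ := h
    have harith : i + (c :: cs).length = (i + 1) + cs.length := by simp; omega
    rw [harith]
    by_cases hs : PySem.Chars.isspace c = true
    · cases cur with
      | none =>
        simp only [bSegGo, hs, if_true]
        refine ih (i+1) spans none ⟨h1, h2, by simp, fun _ p hp => ?_⟩
        have := h4 rfl p hp
        have : ((i : Int)) ≤ ((i+1 : Nat) : Int) := by push_cast; omega
        omega
      | some c0 =>
        simp only [bSegGo, hs, if_true]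
        have hc0 := h3 c0 rfl
        refine ih (i+1) _ none ⟨?_, ?_, by simp, ?_⟩
        · intro p hp
          rcases List.mem_append.1 hp with hp | hp
          · exact h1 p hp
          · simp at hp; subst hp; exact hc0.2
        · refine List.pairwise_append.2 ⟨h2, List.pairwise_singleton _ _, ?_⟩
          intro p hp q hq; simp at hq; subst hq; exact hc0.1 p hp
        · intro _ p hp
          rcases List.mem_append.1 hp with hp | hp
          · have := hc0.1 p hp
            have h5 := hc0.2
            have : ((i : Int)) ≤ ((i+1 : Nat) : Int) := by push_cast; omega
            omega
          · simp at hp; subst hp; push_cast; omega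
    · cases cur with
      | none =>
        simp only [bSegGo, hs, if_false, Bool.false_eq_true]
        refine ih (i+1) spans (some (i : Int)) ⟨h1, h2, ?_, by simp⟩
        intro c0 hc0
        simp at hc0; subst hc0
        exact ⟨h4 rfl, by push_cast; omega⟩
      | some c0 =>
        simp only [bSegGo, hs, if_false, Bool.false_eq_true]
        refine ih (i+1) spans (some c0) ⟨h1, h2, ?_, by simp⟩
        intro c1 hc1
        simp at hc1; subst hc1
        have := h3 c0 rfl
        refine ⟨this.1, ?_⟩
        have h5 := this.2
        have : ((i : Int)) ≤ ((i+1 : Nat) : Int) := by push_cast; omega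
        omega

-- sortedness of the final span list (after the trailing append)
def Sorted (spans : List (Int × Int)) : Prop :=
  (∀ p ∈ spans, p.1 < p.2) ∧ spans.Pairwise (fun p q => p.2 ≤ q.1)

lemma sorted_final (cs : List Char) :
    Sorted (match (bSegGo cs 0 ([], none)).2 with
            | some c0 => (bSegGo cs 0 ([], none)).1 ++ [(c0, (cs.length : Int))]
            | none => (bSegGo cs 0 ([], none)).1) := by
  have h := bSegGo_inv cs 0 [] none ⟨by simp, by simp, by simp, by simp⟩
  obtain ⟨h1, h2, h3, h4⟩ := h
  cases hcur : (bSegGo cs 0 ([], none)).2 with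
  | none => exact ⟨h1, h2⟩
  | some c0 =>
    rw [hcur] at h3
    have hc0 := h3 c0 rfl
    refine ⟨?_, ?_⟩
    · intro p hp
      rcases List.mem_append.1 hp with hp | hp
      · exact h1 p hp
      · simp at hp; subst hp
        have := hc0.2; push_cast at this ⊢; omega
    · refine List.pairwise_append.2 ⟨h2, List.pairwise_singleton _ _, ?_⟩
      intro p hp q hq; simp at hq; subst hq; exact hc0.1 p hp

lemma snd_mono (spans : List (Int × Int)) (h : Sorted spans) :
    ∀ j k, (hj : j < spans.length) → (hk : k < spans.length) → j ≤ k → spans[j].2 ≤ spans[k].2 := by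
  intro j k hj hk hjk
  rcases Nat.eq_or_lt_of_le hjk with rfl | hlt
  · exact le_refl _
  · have hpq := List.pairwise_iff_getElem.mp h.2 j k hj hk hlt
    have hlt2 := h.1 spans[k] (List.getElem_mem hk)
    omega

lemma bSearch_eq_findIdx (spans : List (Int × Int)) (s : Int) (h : Sorted spans) :
    ∀ lo hi, lo ≤ hi → hi ≤ spans.length →
    (∀ j, j < lo → (hj : j < spans.length) → ¬ s < spans[j].2) →
    (∀ j, hi ≤ j → (hj : j < spans.length) → s < spans[j].2) →
    bSearch spans s lo hi = spans.findIdx (fun p => decide (s < p.2)) := by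
  intro lo hi
  induction lo, hi using bSearch.induct spans s with
  | case1 lo hi hlt hpred ih =>
    intro hle hhi hlow hhigh
    rw [bSearch, if_pos hlt, if_pos hpred]
    refine ih (by omega) (by omega) hlow ?_
    intro j hj hjlen
    have hmidlen : (lo + hi) / 2 < spans.length := by omega
    rw [List.getD_eq_getElem spans (0, 0) hmidlen] at hpred
    have := snd_mono spans h ((lo + hi) / 2) j hmidlen hjlen hj
    omega
  | case2 lo hi hlt hpred ih =>
    intro hle hhi hlow hhigh
    rw [bSearch, if_pos hlt, if_neg hpred]
    refine ih (by omega) hhi ?_ hhigh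
    intro j hj hjlen
    have hmidlen : (lo + hi) / 2 < spans.length := by omega
    rw [List.getD_eq_getElem spans (0, 0) hmidlen] at hpred
    intro hcon
    exact hpred (lt_of_lt_of_le hcon (snd_mono spans h j ((lo + hi) / 2) hjlen hmidlen (by omega)))
  | case3 lo hi hlt =>
    intro hle hhi hlow hhigh
    have hlohi : lo = hi := by omega
    subst hlohi
    rw [bSearch, if_neg hlt]
    by_cases hlen : lo < spans.length
    · symm
      rw [List.findIdx_eq hlen]
      refine ⟨by simpa using hhigh lo (le_refl _) hlen, ?_⟩
      intro j hj
      simpa using hlow j hj (by omega)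
    · have hloeq : lo = spans.length := by omega
      rw [hloeq]
      symm
      refine List.findIdx_eq_length.mpr ?_
      intro x hx
      obtain ⟨j, hjlen, rfl⟩ := List.mem_iff_getElem.mp hx
      simpa using hlow j (by omega) hjlen

lemma zScan_none (s e : Int) : ∀ (spans : List (Int × Int)) (i : Nat),
    (∀ p ∈ spans, ¬ e > p.1) → zScan s e spans i = none := by
  intro spans
  induction spans with
  | nil => intro i _; rfl
  | cons p rest ih =>
    intro i h
    obtain ⟨w0, w1⟩ := p
    simp only [zScan]
    rw [if_neg (by have := h (w0, w1) (by simp); tauto)]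
    exact ih (i+1) (fun q hq => h q (by simp [hq]))

lemma zScan_eq (s e : Int) : ∀ (spans : List (Int × Int)) (i : Nat), Sorted spans →
    zScan s e spans i =
      (if spans.findIdx (fun p => decide (s < p.2)) < spans.length ∧
          e > (spans.getD (spans.findIdx (fun p => decide (s < p.2))) (0, 0)).1
       then some (i + spans.findIdx (fun p => decide (s < p.2))) else none) := by
  intro spans
  induction spans with
  | nil => intro i h; simp [zScan]
  | cons p rest ih =>
    intro i h
    obtain ⟨w0, w1⟩ := p
    have hrest : Sorted rest := ⟨fun q hq => h.1 q (by simp [hq]), (List.pairwise_cons.mp h.2).2⟩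
    simp only [zScan]
    by_cases hp : s < w1
    · have hF : ((w0, w1) :: rest).findIdx (fun p => decide (s < p.2)) = 0 := by
        simp [List.findIdx_cons, hp]
      rw [hF]
      by_cases he : e > w0
      · rw [if_pos ⟨hp, he⟩, if_pos (by simp [he])]
        simp
      · rw [if_neg (by tauto), if_neg (by simp [List.getD]; omega)]
        apply zScan_none
        intro q hq
        have hq1 := (List.pairwise_cons.mp h.2).1 q hq
        have hq2 := h.1 (w0, w1) (by simp)
        simp only [gt_iff_lt] at he ⊢
        omega
    · have hF : ((w0, w1) :: rest).findIdx (fun p => decide (s < p.2)) =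
          rest.findIdx (fun p => decide (s < p.2)) + 1 := by
        simp [List.findIdx_cons, hp]
      rw [if_neg (by tauto), ih (i+1) hrest, hF]
      by_cases hFlen : rest.findIdx (fun p => decide (s < p.2)) < rest.length
      · by_cases hfst : e > (rest.getD (rest.findIdx (fun p => decide (s < p.2))) (0, 0)).1
        · rw [if_pos ⟨hFlen, hfst⟩, if_pos (by simpa [List.getD_cons_succ] using ⟨by simpa using Nat.succ_lt_succ hFlen, hfst⟩)]
          congr 1
          omega
        · rw [if_neg (by tauto), if_neg (by rw [List.getD_cons_succ]; exact fun hc => hfst hc.2)]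
      · rw [if_neg (by omega), if_neg (by exact fun hc => hFlen (by simpa using Nat.lt_of_succ_lt_succ hc.1))]

lemma token_step_eq (ws we : List Int) (h : ws.length = we.length)
    (hs : Sorted (ws.zip we)) (b : List (List Int)) (p : Int × (Int × Int)) :
    (match aScan p.2.1 p.2.2 ws we 0 with
     | some idx => b.set idx (b.getD idx [] ++ [p.1])
     | none => b) =
    (let lo := bSearch (ws.zip we) p.2.1 0 (ws.zip we).length
     if lo < (ws.zip we).length ∧ p.2.2 > ((ws.zip we).getD lo (0, 0)).1 then
       b.set lo (b.getD lo [] ++ [p.1])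
     else b) := by
  rw [aScan_eq_zScan p.2.1 p.2.2 ws we 0 h, zScan_eq _ _ _ 0 hs,
      bSearch_eq_findIdx _ _ hs 0 (ws.zip we).length (Nat.zero_le _) (le_refl _)
        (fun j hj _ => absurd hj (by omega))
        (fun j hj hjl => absurd hjl (Nat.not_lt.mpr hj))]
  by_cases hc : (ws.zip we).findIdx (fun q => decide (p.2.1 < q.2)) < (ws.zip we).length ∧
      p.2.2 > ((ws.zip we).getD ((ws.zip we).findIdx (fun q => decide (p.2.1 < q.2))) (0, 0)).1
  · rw [if_pos hc]
    simp only [Nat.zero_add]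
    rw [if_pos hc]
  · rw [if_neg hc, if_neg hc]

-- ===== VERDICT (by name: the statement is the Claim_ definition above) =====
theorem map_tokens_to_words_spec : Claim_equal_map_tokens_to_words := by
  intro text toks _
  unfold Spec_map_tokens_to_words map_tokens_to_words map_tokens_to_words_alt
  obtain ⟨hlen, hzip⟩ := bSegGo_eq_aSegGo text.toList 0 [] [] none rfl
  simp only [List.zip_nil_left] at hzip
  have hsorted := sorted_final text.toList
  rw [hzip] at hsorted
  simp only []
  simp only [hzip]
  cases hcur : (aSegGo text.toList 0 ([], [], none)).2.2 with
  | none =>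
    rw [hcur] at hsorted
    simp only [] at hsorted
    simp only []
    have hL : ((aSegGo text.toList 0 ([], [], none)).1.zip
        (aSegGo text.toList 0 ([], [], none)).2.1).length =
        (aSegGo text.toList 0 ([], [], none)).1.length := by
      rw [List.length_zip, hlen, Nat.min_self]
    exact congrFun (congrArg₂ List.foldl
      (funext fun b => funext fun p => token_step_eq _ _ hlen hsorted b p)
      (by rw [hL])) _
  | some c0 =>
    rw [hcur] at hsorted
    simp only [] at hsorted
    simp only []
    have hlen' : ((aSegGo text.toList 0 ([], [], none)).1 ++ [c0]).length =
        ((aSegGo text.toList 0 ([], [], none)).2.1 ++ [(text.toList.length : Int)]).length := by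
      simp [hlen]
    have hz2 : ((aSegGo text.toList 0 ([], [], none)).1 ++ [c0]).zip
        ((aSegGo text.toList 0 ([], [], none)).2.1 ++ [(text.toList.length : Int)]) =
        (aSegGo text.toList 0 ([], [], none)).1.zip (aSegGo text.toList 0 ([], [], none)).2.1 ++
          [(c0, (text.toList.length : Int))] := by
      rw [List.zip_append hlen]; rfl
    rw [← hz2] at hsorted
    rw [← hz2]
    have hL : (((aSegGo text.toList 0 ([], [], none)).1 ++ [c0]).zip
        ((aSegGo text.toList 0 ([], [], none)).2.1 ++ [(text.toList.length : Int)])).length =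
        ((aSegGo text.toList 0 ([], [], none)).1 ++ [c0]).length := by
      rw [List.length_zip, hlen', Nat.min_self]
    exact congrFun (congrArg₂ List.foldl
      (funext fun b => funext fun p => token_step_eq _ _ hlen' hsorted b p)
      (by rw [hL])) _
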